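-- pv_equiv track=rewrite | github.com/Wolfie-Kat/aau-ML | WS 2/Exercise5.py | func
-- ===== SOURCE A (Python) =====
-- def func(x, y):
--     index = -1
--
--     for i in range(len(y)):
--         for j in range(len(x)):
--             if x[j] == y[i]:
--                 index = i
--                 break
--     return index
-- ===== SOURCE B (Python) =====
-- def func(x, y):
--     xs = set(x)
--     for i in range(len(y) - 1, -1, -1):
--         if y[i] in xs:
--             return i
--     return -1
-- ===== Notes on version B (the rewrite author's own statement) =====
-- stated objective: faster
-- what changed: Backward scan over y with an early return on the first (i.e. highest-index) hit, testing membership against a set built once from x, instead of A's full forward double loop that keeps overwriting an accumulator.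
import Mathlib
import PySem

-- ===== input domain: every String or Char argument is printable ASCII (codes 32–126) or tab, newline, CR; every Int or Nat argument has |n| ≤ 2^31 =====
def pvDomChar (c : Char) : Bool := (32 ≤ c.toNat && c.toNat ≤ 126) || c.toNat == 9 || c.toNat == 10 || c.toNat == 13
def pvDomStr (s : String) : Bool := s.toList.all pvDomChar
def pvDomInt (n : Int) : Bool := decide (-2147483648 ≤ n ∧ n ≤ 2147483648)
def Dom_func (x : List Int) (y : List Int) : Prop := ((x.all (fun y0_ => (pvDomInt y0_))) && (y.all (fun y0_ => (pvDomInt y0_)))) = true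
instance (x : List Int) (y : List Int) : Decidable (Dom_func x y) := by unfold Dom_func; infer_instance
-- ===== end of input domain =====

-- B replaces A's forward double loop (accumulator overwritten on each hit) by a backward
-- scan with an early return on the first hit, against a set built once from x (faster).

-- ===== PORT A =====
-- inner loop: for j over x, on first x[j] == yi set index := i and break
def funcInner (x : List Int) (yi : Int) (i : Int) (index : Int) : Int :=
  match x with
  | [] => index
  | a :: rest => if a = yi then i else funcInner rest yi i index

-- outer loop: for i over y, index := funcInner x y[i] i index
def funcLoop (x : List Int) (ys : List Int) (i : Int) (index : Int) : Int :=
  match ys with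
  | [] => index
  | yi :: rest => funcLoop x rest (i + 1) (funcInner x yi i index)

def func (x : List Int) (y : List Int) : Int := funcLoop x y 0 (-1)

-- ===== PORT B =====
-- backward scan: iterate the reversed y with counter i going down; early return on a hit
def funcAltLoop (xs : PySem.Set Int) (rys : List Int) (i : Int) : Int :=
  match rys with
  | [] => -1
  | yi :: rest => if PySem.Set.contains xs yi then i else funcAltLoop xs rest (i - 1)

def func_alt (x : List Int) (y : List Int) : Int :=
  funcAltLoop (PySem.Set.ofList x) y.reverse ((y.length : Int) - 1)

-- ===== PRECONDITION & SPEC =====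
def Spec_func (x : List Int) (y : List Int) (out : Int) : Prop := out = func_alt x y
instance (x : List Int) (y : List Int) (out : Int) : Decidable (Spec_func x y out) := by unfold Spec_func; infer_instance

-- ===== CLAIM (what is proved, stated in full; the proofs are below) =====
def Claim_equal_func : Prop := ∀ (x : List Int) (y : List Int), Dom_func x y → Spec_func x y (func x y)

-- ===== LEMMAS AND PROOFS =====

-- A's inner loop returns i iff x contains yi, else the old index
theorem funcInner_eq (x : List Int) (yi i index : Int) :
    funcInner x yi i index = if yi ∈ x then i else index := by
  induction x with
  | nil => simp [funcInner]
  | cons a rest ih =>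
      simp only [funcInner, List.mem_cons, ih]
      by_cases h : a = yi
      · simp [h]
      · have : ¬ yi = a := fun hh => h hh.symm
        simp [h, this]

-- A's outer loop over ys ++ [z]
theorem funcLoop_snoc (x : List Int) (ys : List Int) (z : Int) (i index : Int) :
    funcLoop x (ys ++ [z]) i index =
      if z ∈ x then i + (ys.length : Int) else funcLoop x ys i index := by
  induction ys generalizing i index with
  | nil => simp [funcLoop, funcInner_eq]
  | cons yi rest ih =>
      simp only [List.cons_append, funcLoop, ih, List.length_cons]
      by_cases h : z ∈ x
      · simp [h]; ring
      · simp [h]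

theorem set_contains_iff (x : List Int) (z : Int) :
    PySem.Set.contains (PySem.Set.ofList x) z = true ↔ z ∈ x := by
  rw [PySem.Set.contains_iff, PySem.Set.mem_ofList]

theorem main_eq (x : List Int) (y : List Int) :
    funcLoop x y 0 (-1) = funcAltLoop (PySem.Set.ofList x) y.reverse ((y.length : Int) - 1) := by
  induction y using List.reverseRecOn with
  | nil => simp [funcLoop, funcAltLoop]
  | append_singleton ys z ih =>
      rw [funcLoop_snoc, List.reverse_append]
      simp only [List.reverse_singleton, List.singleton_append, funcAltLoop,
        List.length_append, List.length_singleton]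
      by_cases h : z ∈ x
      · rw [if_pos h, if_pos ((set_contains_iff x z).mpr h)]
        push_cast; ring
      · rw [if_neg h, if_neg (by simp [h])]
        rw [ih]
        congr 1
        push_cast; ring

-- ===== VERDICT (by name: the statement is the Claim_ definition above) =====
theorem func_spec : Claim_equal_func := by
  intro x y _
  show func x y = func_alt x y
  exact main_eq x y
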